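-- pv_equiv track=rewrite | github.com/mair28/Vizion-Project | async_url_processor.py | deduplicate_parent_child_urls
-- ===== SOURCE A (Python) =====
-- from typing import Dict, Optional, List
--
-- def deduplicate_parent_child_urls(urls: List[str]) -> List[str]:
--     """
--     Remove child URLs when parent URLs exist to avoid duplicate processing.
--     Only applies to meaningful category hierarchies, not homepage elimination.
--     """
--     if not urls:
--         return urls
--
--     # Normalize URLs - remove trailing slashes and fragments for comparison
--     normalized_urls = []
--     for url in urls:
--         # Remove trailing slashes and fragments (#)
--         clean_url = url.rstrip('/').split('#')[0].split('?')[0]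
--         normalized_urls.append((clean_url, url))  # (normalized, original)
--
--     # Sort by URL length (shortest first) so parents come before children
--     normalized_urls.sort(key=lambda x: len(x[0]))
--
--     # Keep track of URLs to keep
--     urls_to_keep = []
--     excluded_urls = set()
--
--     for normalized_url, original_url in normalized_urls:
--         # Skip if this URL was already marked as a child of a parent
--         if normalized_url in excluded_urls:
--             continue
--
--         # Add this URL to keep list
--         urls_to_keep.append(original_url)
--
--         # Only exclude children if the parent has meaningful depth (not just homepage)
--         # Count path segments to determine if this is a meaningful parent
--         path_segments = len([seg for seg in normalized_url.split('/')[3:] if seg])  # Skip protocol and domain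
--
--         # Only apply parent-child logic if parent has at least 1 path segment
--         # This prevents homepage from eliminating category pages
--         if path_segments >= 1:
--             # Mark all URLs that start with this URL as children (exclude them)
--             for other_normalized, other_original in normalized_urls:
--                 if (other_normalized != normalized_url and
--                     other_normalized.startswith(normalized_url + '/') and
--                     other_normalized not in excluded_urls):
--                     excluded_urls.add(other_normalized)
--
--     return urls_to_keep
-- ===== SOURCE B (Python) =====
-- from typing import List
--
-- def deduplicate_parent_child_urls(urls: List[str]) -> List[str]:
--     """Same result as A, but order-free: a URL is dropped exactly when some
--     directory-prefix ancestor of its normalized form appears (normalized, with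
--     at least one path segment) anywhere in the input, so no sequential excluded
--     set is maintained -- one global set built up front, then a single filter."""
--     if not urls:
--         return urls
--
--     pairs = [(u.rstrip('/').split('#')[0].split('?')[0], u) for u in urls]
--     # every normalized URL with at least one path segment can act as a parent
--     excluders = {n for n, _ in pairs if any(seg for seg in n.split('/')[3:])}
--     pairs.sort(key=lambda p: len(p[0]))
--     return [orig for n, orig in pairs
--             if not any(n[:i] in excluders for i, ch in enumerate(n) if ch == '/')]
-- ===== Notes on version B (the rewrite author's own statement) =====
-- stated objective: alternative
-- what changed: A makes one stateful pass over the length-sorted list, growing an excluded set by re-scanning the whole list at every kept parent (worst-case O(n^2*L)); B is order-free: it builds one global set of every normalized URL with >=1 path segment up front, then keeps exactly the URLs none of whose directory-prefix ancestors is in that set, via a single filter (correct because the shortest such ancestor is always itself kept by A).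
import Mathlib
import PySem

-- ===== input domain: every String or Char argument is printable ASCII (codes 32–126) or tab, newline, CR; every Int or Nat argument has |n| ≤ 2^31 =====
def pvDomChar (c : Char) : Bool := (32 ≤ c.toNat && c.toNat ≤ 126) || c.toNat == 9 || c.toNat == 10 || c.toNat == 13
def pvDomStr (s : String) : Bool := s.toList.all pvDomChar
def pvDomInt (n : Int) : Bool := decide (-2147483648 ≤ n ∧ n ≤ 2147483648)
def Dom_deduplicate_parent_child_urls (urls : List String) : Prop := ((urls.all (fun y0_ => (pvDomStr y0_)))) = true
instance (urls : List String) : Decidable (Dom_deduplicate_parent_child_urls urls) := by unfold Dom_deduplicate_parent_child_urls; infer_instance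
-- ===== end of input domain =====

-- B replaces A's stateful pass (excluded set grown by re-scanning the whole list at every kept
-- parent) by an order-free formulation: one global set of all possible parent URLs built up
-- front, then a single filter testing each URL's directory-prefix ancestors (objective: alternative).

-- ===== PORT A =====
-- url.rstrip('/').split('#')[0].split('?')[0]; rstrip('/') is ported by hand (drop trailing '/'
-- characters — exact); split(sep) never returns [], so [0] is headD.
def pvNormA (url : String) : List Char :=
  let r := (url.toList.reverse.dropWhile (· == '/')).reverse
  let s1 := (PySem.Chars.splitOn r ['#']).headD []
  (PySem.Chars.splitOn s1 ['?']).headD []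

-- len([seg for seg in n.split('/')[3:] if seg])
def pvSegsA (n : List Char) : Nat :=
  ((PySem.List.slice (PySem.Chars.splitOn n ['/']) (some 3) none).filter (fun seg => !seg.isEmpty)).length

-- the inner 'for other_normalized, other_original in normalized_urls' loop of A
def pvStepA (L : List (List Char × String)) (st : List String × PySem.Set (List Char))
    (p : List Char × String) : List String × PySem.Set (List Char) :=
  if PySem.Set.contains st.2 p.1 = true then st
  else
    (st.1 ++ [p.2],
     if 1 ≤ pvSegsA p.1 then
       L.foldl
         (fun ex q =>
           if q.1 ≠ p.1 ∧ PySem.Chars.startswith q.1 (p.1 ++ ['/']) = true ∧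
              PySem.Set.contains ex q.1 = false
           then PySem.Set.add ex q.1 else ex) st.2
     else st.2)

def deduplicate_parent_child_urls (urls : List String) : List String :=
  if urls = [] then urls
  else
    let normalized := urls.map (fun url => (pvNormA url, url))
    let sortedL := PySem.List.sorted normalized (fun p => p.1.length) false
    (sortedL.foldl (pvStepA sortedL) ([], PySem.Set.empty)).1

-- ===== PORT B =====
def pvNormB (url : String) : List Char :=
  let r := (url.toList.reverse.dropWhile (· == '/')).reverse
  let s1 := (PySem.Chars.splitOn r ['#']).headD []
  (PySem.Chars.splitOn s1 ['?']).headD []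

-- any(seg for seg in n.split('/')[3:])
def pvIsExclB (n : List Char) : Bool :=
  (PySem.List.slice (PySem.Chars.splitOn n ['/']) (some 3) none).any (fun seg => !seg.isEmpty)

-- any(n[:i] in excluders for i, ch in enumerate(n) if ch == '/')
def pvHasAncB (E : PySem.Set (List Char)) (n : List Char) : Bool :=
  (PySem.List.enumerate n).any
    (fun q => q.2 == '/' && PySem.Set.contains E (PySem.List.slice n none (some q.1)))

def deduplicate_parent_child_urls_alt (urls : List String) : List String :=
  if urls = [] then urls
  else
    let pairs := urls.map (fun u => (pvNormB u, u))
    let excluders : PySem.Set (List Char) :=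
      PySem.Set.ofList ((pairs.map Prod.fst).filter pvIsExclB)
    let sortedP := PySem.List.sorted pairs (fun p => p.1.length) false
    (sortedP.filter (fun p => !pvHasAncB excluders p.1)).map Prod.snd

-- ===== PRECONDITION & SPEC =====
def Spec_deduplicate_parent_child_urls (urls : List String) (out : List String) : Prop := out = deduplicate_parent_child_urls_alt urls
instance (urls : List String) (out : List String) : Decidable (Spec_deduplicate_parent_child_urls urls out) := by unfold Spec_deduplicate_parent_child_urls; infer_instance

-- ===== CLAIM (what is proved, stated in full; the proofs are below) =====
def Claim_equal_deduplicate_parent_child_urls : Prop := ∀ (urls : List String), Dom_deduplicate_parent_child_urls urls → Spec_deduplicate_parent_child_urls urls (deduplicate_parent_child_urls urls)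

-- ===== LEMMAS AND PROOFS =====

-- 1 path segment ⟺ some nonempty segment
lemma pv_segs_iff (n : List Char) : 1 ≤ pvSegsA n ↔ pvIsExclB n = true := by
  unfold pvSegsA pvIsExclB
  rw [List.any_eq_true, Nat.succ_le_iff, List.length_pos_iff, Ne, List.filter_eq_nil_iff]
  push Not
  simp

-- 's is a child of p' : s starts with p + '/'
lemma pv_sw_ne {s p : List Char} (h : PySem.Chars.startswith s (p ++ ['/']) = true) : s ≠ p := by
  rw [PySem.Chars.startswith_iff] at h
  intro heq
  subst heq
  have := h.length_le
  simp at this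

-- B's ancestor scan finds exactly the excluders of which n is a child
lemma pv_hasAnc_iff (E : PySem.Set (List Char)) (n : List Char) :
    pvHasAncB E n = true ↔ ∃ p ∈ E, PySem.Chars.startswith n (p ++ ['/']) = true := by
  unfold pvHasAncB
  rw [List.any_eq_true]
  constructor
  · rintro ⟨q, hq, hcond⟩
    rw [PySem.List.mem_enumerate_iff] at hq
    obtain ⟨k, hk, rfl⟩ := hq
    simp only [Bool.and_eq_true, beq_iff_eq] at hcond
    obtain ⟨hsl, hmem⟩ := hcond
    have hsl' : PySem.List.slice n none (some ((0 : Int) + (k : Int))) = n.take k := by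
      simp [PySem.List.slice_to_natCast n k]
    rw [hsl'] at hmem
    refine ⟨n.take k, by simpa [PySem.Set.contains, List.contains_iff_mem] using hmem, ?_⟩
    rw [PySem.Chars.startswith_iff]
    refine ⟨n.drop (k + 1), ?_⟩
    have := List.take_append_drop k n
    rw [List.drop_eq_getElem_cons hk] at this
    simpa [hsl, List.append_assoc] using this
  · rintro ⟨p, hpE, hsw⟩
    rw [PySem.Chars.startswith_iff] at hsw
    obtain ⟨t, ht⟩ := hsw
    subst ht
    have hk : p.length < (p ++ ['/'] ++ t).length := by simp
    refine ⟨((0 : Int) + (p.length : Int), (p ++ ['/'] ++ t)[p.length]), ?_, ?_⟩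
    · rw [PySem.List.mem_enumerate_iff]
      exact ⟨p.length, hk, rfl⟩
    · have hget : (p ++ ['/'] ++ t)[p.length] = '/' := by
        simp
      have htake : (p ++ ['/'] ++ t).take p.length = p := by
        simp
      simp only [Bool.and_eq_true, beq_iff_eq]
      exact ⟨hget, by simp [PySem.Set.contains, hpE]⟩

-- membership after A's inner marking loop
lemma pv_innerFold_mem (n : List Char) (M : List (List Char × String)) :
    ∀ (excl : PySem.Set (List Char)) (s : List Char),
      (s ∈ M.foldl
        (fun ex q =>
          if q.1 ≠ n ∧ PySem.Chars.startswith q.1 (n ++ ['/']) = true ∧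
             PySem.Set.contains ex q.1 = false
          then PySem.Set.add ex q.1 else ex) excl)
      ↔ s ∈ excl ∨ ∃ q ∈ M, q.1 = s ∧ PySem.Chars.startswith s (n ++ ['/']) = true := by
  induction M with
  | nil => intro excl s; simp
  | cons q0 tail ih =>
    intro excl s
    simp only [List.foldl_cons]
    split_ifs with hc
    · rw [ih]
      obtain ⟨hne, hsw, _⟩ := hc
      constructor
      · rintro (hmem | h)
        · rw [PySem.Set.mem_add] at hmem
          rcases hmem with h' | rfl
          · exact Or.inl h'
          · exact Or.inr ⟨q0, by simp, rfl, hsw⟩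
        · obtain ⟨q, hq, h1, h2⟩ := h
          exact Or.inr ⟨q, by simp [hq], h1, h2⟩
      · rintro (h' | ⟨q, hq, h1, h2⟩)
        · exact Or.inl (by rw [PySem.Set.mem_add]; exact Or.inl h')
        · rcases List.mem_cons.mp hq with rfl | hqt
          · exact Or.inl (by rw [PySem.Set.mem_add]; exact Or.inr h1.symm)
          · exact Or.inr ⟨q, hqt, h1, h2⟩
    · rw [ih]
      push Not at hc
      constructor
      · rintro (h' | ⟨q, hq, h1, h2⟩)
        · exact Or.inl h'
        · exact Or.inr ⟨q, by simp [hq], h1, h2⟩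
      · rintro (h' | ⟨q, hq, h1, h2⟩)
        · exact Or.inl h'
        · rcases List.mem_cons.mp hq with rfl | hqt
          · subst h1
            have hct : PySem.Set.contains excl q.1 = true := by
              have := hc (pv_sw_ne h2) h2
              simpa using this
            exact Or.inl (by simpa [PySem.Set.contains, List.contains_iff_mem] using hct)
          · exact Or.inr ⟨q, hqt, h1, h2⟩

-- invariant: after A has processed 'done', its excluded set holds exactly the listed URLs that
-- are children of an already-processed URL with ≥ 1 path segment
def pvInv (L done : List (List Char × String)) (excl : PySem.Set (List Char)) : Prop :=
  ∀ s ∈ L.map Prod.fst,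
    (s ∈ excl ↔ ∃ p ∈ done.map Prod.fst, pvIsExclB p = true ∧
        PySem.Chars.startswith s (p ++ ['/']) = true)

-- A's remaining fold = B's filter of the remaining suffix, given the invariant
lemma pv_loop_eq (L : List (List Char × String)) (G : PySem.Set (List Char))
    (hG : ∀ n, n ∈ G ↔ n ∈ L.map Prod.fst ∧ pvIsExclB n = true)
    (hsort : List.Pairwise (fun a b => a.1.length ≤ b.1.length) L) :
    ∀ (rest done : List (List Char × String)) (keep : List String)
      (excl : PySem.Set (List Char)),
      L = done ++ rest → pvInv L done excl →
      (rest.foldl (pvStepA L) (keep, excl)).1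
        = keep ++ (rest.filter (fun p => !pvHasAncB G p.1)).map Prod.snd := by
  intro rest
  induction rest with
  | nil => intro done keep excl _ _; simp
  | cons q tail ih =>
    intro done keep excl hL hinv
    have hqL : q.1 ∈ L.map Prod.fst := by
      rw [hL]; exact List.mem_map.mpr ⟨q, by simp, rfl⟩
    have hLdone : ∀ p ∈ done.map Prod.fst, p ∈ L.map Prod.fst := by
      intro p hp; rw [hL, List.map_append, List.mem_append]; exact Or.inl hp
    simp only [List.foldl_cons, List.filter_cons]
    by_cases hex : q.1 ∈ excl
    · -- A skips q; B's filter drops q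
      obtain ⟨p, hpD, hpE, hpsw⟩ := (hinv q.1 hqL).mp hex
      have hB : pvHasAncB G q.1 = true :=
        (pv_hasAnc_iff G q.1).mpr ⟨p, (hG p).mpr ⟨hLdone p hpD, hpE⟩, hpsw⟩
      have hA : PySem.Set.contains excl q.1 = true := by
        simpa [PySem.Set.contains, List.contains_iff_mem] using hex
      rw [show pvStepA L (keep, excl) q = (keep, excl) by simp [pvStepA, hex], hB]
      simp only [Bool.not_true, Bool.false_eq_true, if_false]
      apply ih (done ++ [q]) keep excl (by simp [hL])
      -- invariant survives: a child of q is a child of one of q's processed ancestors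
      intro s hsL
      rw [hinv s hsL]
      constructor
      · rintro ⟨r, hr, h1, h2⟩; exact ⟨r, by simp [hr], h1, h2⟩
      · rintro ⟨r, hr, h1, h2⟩
        simp only [List.map_append, List.mem_append] at hr
        rcases hr with hr | hr
        · exact ⟨r, hr, h1, h2⟩
        · -- r = q.1 : q itself was excluded by some processed ancestor p, also an ancestor of s
          have hrq : r = q.1 := by simpa using hr
          rw [hrq] at h2
          refine ⟨p, hpD, hpE, ?_⟩
          rw [PySem.Chars.startswith_iff] at h2 hpsw ⊢
          exact hpsw.trans ((List.prefix_append q.1 ['/']).trans h2)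
    · -- A keeps q; B's filter keeps q
      have hB : pvHasAncB G q.1 = false := by
        rw [Bool.eq_false_iff]
        intro h
        obtain ⟨p, hpG, hpsw⟩ := (pv_hasAnc_iff G q.1).mp h
        obtain ⟨hpL, hpE⟩ := (hG p).mp hpG
        have hplen : p.length < q.1.length := by
          have := (PySem.Chars.startswith_iff _ _).mp hpsw
          have := this.length_le
          simp at this; omega
        rw [hL, List.map_append, List.mem_append] at hpL
        rcases hpL with hpD | hpR
        · exact hex ((hinv q.1 hqL).mpr ⟨p, hpD, hpE, hpsw⟩)
        · -- p listed after q: impossible, the list is length-sorted and p is shorter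
          rw [hL] at hsort
          obtain ⟨r, hrq, hr1⟩ := List.mem_map.mp hpR
          rcases List.mem_cons.mp hrq with rfl | hrt
          · rw [← hr1] at hplen; omega
          · have := (List.pairwise_cons.mp (List.pairwise_append.mp hsort).2.1).1 r hrt
            rw [hr1] at this; omega
      have hA : PySem.Set.contains excl q.1 = false := by
        simpa [PySem.Set.contains, List.contains_iff_mem] using hex
      rw [hB]
      simp only [Bool.not_false, if_true, List.map_cons]
      rw [show pvStepA L (keep, excl) q =
            (keep ++ [q.2],
             if 1 ≤ pvSegsA q.1 then
               L.foldl (fun ex r =>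
                 if r.1 ≠ q.1 ∧ PySem.Chars.startswith r.1 (q.1 ++ ['/']) = true ∧
                    PySem.Set.contains ex r.1 = false
                 then PySem.Set.add ex r.1 else ex) excl
             else excl) by simp [pvStepA, hex]]
      by_cases hs : 1 ≤ pvSegsA q.1
      · have hsE : pvIsExclB q.1 = true := (pv_segs_iff q.1).mp hs
        simp only [hs, if_pos]
        rw [ih (done ++ [q]) (keep ++ [q.2]) _ (by simp [hL]) ?_]
        · simp
        · intro s hsL
          rw [pv_innerFold_mem, hinv s hsL]
          constructor
          · rintro (⟨p, hp, h1, h2⟩ | ⟨r, _, rfl, hsw⟩)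
            · exact ⟨p, by simp [hp], h1, h2⟩
            · exact ⟨q.1, by simp, hsE, hsw⟩
          · rintro ⟨p, hp, h1, h2⟩
            simp only [List.map_append, List.mem_append] at hp
            rcases hp with hp | hp
            · exact Or.inl ⟨p, hp, h1, h2⟩
            · have hpq : p = q.1 := by simpa using hp
              subst hpq
              obtain ⟨r, hrL, hr1⟩ := List.mem_map.mp hsL
              exact Or.inr ⟨r, hrL, hr1, h2⟩
      · have hsE : pvIsExclB q.1 = false := by
          rw [Bool.eq_false_iff]; intro h; exact hs ((pv_segs_iff q.1).mpr h)
        simp only [hs, if_false]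
        rw [ih (done ++ [q]) (keep ++ [q.2]) excl (by simp [hL]) ?_]
        · simp
        · intro s hsL
          rw [hinv s hsL]
          constructor
          · rintro ⟨p, hp, h1, h2⟩; exact ⟨p, by simp [hp], h1, h2⟩
          · rintro ⟨p, hp, h1, h2⟩
            simp only [List.map_append, List.mem_append] at hp
            rcases hp with hp | hp
            · exact ⟨p, hp, h1, h2⟩
            · have hpq : p = q.1 := by simpa using hp
              rw [hpq, hsE] at h1; exact absurd h1 (by simp)

-- ===== VERDICT (by name: the statement is the Claim_ definition above) =====
theorem deduplicate_parent_child_urls_spec : Claim_equal_deduplicate_parent_child_urls := by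
  intro urls _
  unfold Spec_deduplicate_parent_child_urls
  unfold deduplicate_parent_child_urls deduplicate_parent_child_urls_alt
  by_cases h : urls = []
  · simp [h]
  · simp only [h, if_false]
    have hnorm : pvNormA = pvNormB := rfl
    rw [hnorm]
    set pairs := urls.map (fun u => (pvNormB u, u)) with hpairs
    set sortedL := PySem.List.sorted pairs (fun p => p.1.length) false with hsorted
    have hperm : sortedL.Perm pairs := PySem.List.sorted_perm pairs _ false
    rw [pv_loop_eq sortedL (PySem.Set.ofList ((pairs.map Prod.fst).filter pvIsExclB))
        ?_ (PySem.List.sorted_pairwise pairs (fun p => p.1.length)) sortedL [] [] PySem.Set.empty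
        (by simp) ?_]
    · simp
    · intro n
      rw [PySem.Set.mem_ofList, List.mem_filter]
      constructor
      · rintro ⟨h1, h2⟩
        exact ⟨by rw [List.Perm.mem_iff (hperm.map Prod.fst)]; exact h1, h2⟩
      · rintro ⟨h1, h2⟩
        exact ⟨by rw [← List.Perm.mem_iff (hperm.map Prod.fst)]; exact h1, h2⟩
    · intro s _
      simp [PySem.Set.empty]
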